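-- pv_equiv track=rewrite | github.com/wangyendt/LeetCode | Biweekly Contests/50-100/biweek 98/2566. Maximum Difference by Remapping a Digit/Maximum Difference by Remapping a Digit.py | minMaxDifference
-- ===== SOURCE A (Python) =====
-- def minMaxDifference(num: int) -> int:
--     s = str(num)
--     mx = int(s.replace(s[0], '9'))
--     for i in range(10):
--         if str(i) in s:
--             mx = max(mx, int(s.replace(str(i), '9')))
--     mn = s.replace(s[0], '0')
--     return int(mx) - int(mn)
-- ===== SOURCE B (Python) =====
-- def minMaxDifference(num: int) -> int:
--     s = str(num)
--     hi = s
--     for ch in s: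
--         if ch != '9':
--             hi = ''.join('9' if x == ch else x for x in s)
--             break
--     lo = ''.join('0' if x == s[0] else x for x in s)
--     return int(hi) - int(lo)
-- ===== Notes on version B (the rewrite author's own statement) =====
-- stated objective: simpler
-- what changed: A builds up the max with a substring-replace+parse pass per decimal digit plus an extra pass for the first character; B scans s once for the leftmost non-'9' character and builds each remapped string in a single per-character pass, parsing exactly twice.
import Mathlib
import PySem

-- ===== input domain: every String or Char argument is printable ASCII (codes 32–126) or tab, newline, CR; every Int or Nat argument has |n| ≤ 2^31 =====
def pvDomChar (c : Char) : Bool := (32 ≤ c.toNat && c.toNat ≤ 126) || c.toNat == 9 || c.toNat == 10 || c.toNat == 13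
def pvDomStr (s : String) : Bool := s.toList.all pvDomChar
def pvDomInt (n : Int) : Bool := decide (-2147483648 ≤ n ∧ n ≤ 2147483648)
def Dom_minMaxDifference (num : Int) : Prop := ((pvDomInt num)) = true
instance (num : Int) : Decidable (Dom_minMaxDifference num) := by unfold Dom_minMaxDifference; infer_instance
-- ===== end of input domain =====

-- B changes the max computation: instead of A's per-digit substring-replace+parse passes it scans once
-- for the leftmost non-'9' character and builds the two remapped strings by a single per-character pass (simpler).

-- Shared primitive: Python's int(cs) for the exact strings both programs build here — an optional
-- leading '-' followed by ASCII decimal digits (PySem.Int.ofChars? computes the same values on this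
-- shape, but its parsing internals are private to PySemCore, so it is ported by hand; exact on this shape).
def pvDigitVal (c : Char) : Int := (c.toNat : Int) - 48

def pvParseDigits (ds : List Char) : Int := ds.foldl (fun a c => 10 * a + pvDigitVal c) 0

def pvInt (cs : List Char) : Int :=
  if cs.head? = some '-' then -(pvParseDigits cs.tail) else pvParseDigits cs

-- ===== PORT A =====
def minMaxDifference (num : Int) : Int :=
  let s := PySem.Int.toChars num                                  -- s = str(num)
  let s0 := (PySem.List.pyGet? s 0).getD ' '                      -- s[0] (str(num) is never empty, so the default is never used)
  let mx := pvInt (PySem.Chars.replace s [s0] ['9'])              -- mx = int(s.replace(s[0], '9'))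
  let mx := (PySem.List.pyRange 0 10 1).foldl                     -- for i in range(10):
    (fun mx i =>
      if PySem.Chars.isIn (PySem.Int.toChars i) s then            --   if str(i) in s:
        max mx (pvInt (PySem.Chars.replace s (PySem.Int.toChars i) ['9']))   -- mx = max(mx, int(s.replace(str(i),'9')))
      else mx) mx
  let mn := PySem.Chars.replace s [s0] ['0']                      -- mn = s.replace(s[0], '0')
  mx - pvInt mn                                                   -- return int(mx) - int(mn)

-- ===== PORT B =====
-- ''.join(b if x == a else x for x in s)
def pvSubst (a b : Char) (s : List Char) : List Char := s.map (fun x => if x = a then b else x)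

def minMaxDifference_alt (num : Int) : Int :=
  let s := PySem.Int.toChars num                                  -- s = str(num)
  let hi := match s.find? (fun c => c ≠ '9') with                 -- for ch in s: if ch != '9': … break
    | some c => pvSubst c '9' s                                   --   hi = ''.join('9' if x == ch else x for x in s)
    | none => s                                                   -- (no break: hi = s)
  let lo := pvSubst ((PySem.List.pyGet? s 0).getD ' ') '0' s      -- lo = ''.join('0' if x == s[0] else x for x in s)
  pvInt hi - pvInt lo                                             -- return int(hi) - int(lo)

-- ===== PRECONDITION & SPEC =====
def Spec_minMaxDifference (num : Int) (out : Int) : Prop := out = minMaxDifference_alt num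
instance (num : Int) (out : Int) : Decidable (Spec_minMaxDifference num out) := by unfold Spec_minMaxDifference; infer_instance

-- ===== CLAIM (what is proved, stated in full; the proofs are below) =====
def Claim_equal_minMaxDifference : Prop := ∀ (num : Int), Dom_minMaxDifference num → Spec_minMaxDifference num (minMaxDifference num)

-- ===== LEMMAS AND PROOFS =====

-- digit characters
def pvIsDig (c : Char) : Prop := c ∈ ['0','1','2','3','4','5','6','7','8','9']

lemma pvIsDig_cases {c : Char} (h : pvIsDig c) :
    c = '0' ∨ c = '1' ∨ c = '2' ∨ c = '3' ∨ c = '4' ∨ c = '5' ∨ c = '6' ∨ c = '7' ∨ c = '8' ∨ c = '9' := by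
  simpa [pvIsDig] using h

lemma pvIsDig_val {c : Char} (h : pvIsDig c) : 0 ≤ pvDigitVal c ∧ pvDigitVal c ≤ 9 := by
  rcases pvIsDig_cases h with h|h|h|h|h|h|h|h|h|h <;> (subst h; decide)

lemma pvIsDig_val_lt {c : Char} (h : pvIsDig c) (h9 : c ≠ '9') : pvDigitVal c < 9 := by
  rcases pvIsDig_cases h with h|h|h|h|h|h|h|h|h|h <;> (subst h; revert h9; decide)

lemma pvIsDig_ne_dash {c : Char} (h : pvIsDig c) : c ≠ '-' := by
  rcases pvIsDig_cases h with h|h|h|h|h|h|h|h|h|h <;> (subst h; decide)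

lemma digitChar_isDig {k : ℕ} (h : k < 10) : pvIsDig (Nat.digitChar k) := by
  interval_cases k <;> (unfold pvIsDig; decide)

lemma digitChar_recover {c : Char} (h : pvIsDig c) : Nat.digitChar (c.toNat - 48) = c := by
  rcases pvIsDig_cases h with h|h|h|h|h|h|h|h|h|h <;> (subst h; decide)

lemma pvIsDig_toNat {c : Char} (h : pvIsDig c) : 48 ≤ c.toNat ∧ c.toNat ≤ 57 := by
  rcases pvIsDig_cases h with h|h|h|h|h|h|h|h|h|h <;> (subst h; decide)

-- str(n) for naturals: Nat.toDigits 10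
lemma toDigitsCore_digits : ∀ (fuel n : ℕ) (acc : List Char), 0 < n → n < fuel →
    Nat.toDigitsCore 10 fuel n acc = ((Nat.digits 10 n).map Nat.digitChar).reverse ++ acc := by
  intro fuel
  induction fuel with
  | zero => intro n acc h0 hf; omega
  | succ f ih =>
    intro n acc h0 hf
    simp only [Nat.toDigitsCore]
    by_cases hn : n / 10 = 0
    · simp only [hn, if_true]
      rw [Nat.digits_def' (by norm_num) h0, hn]
      simp
    · simp only [hn, if_false]
      rw [ih (n / 10) _ (Nat.pos_of_ne_zero hn) (by have := Nat.div_lt_self h0 (by norm_num : 1 < 10); omega), Nat.digits_def' (by norm_num) h0]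
      simp

lemma toDigits_char : ∀ (m : ℕ),
    Nat.toDigits 10 m = if m = 0 then ['0'] else ((Nat.digits 10 m).map Nat.digitChar).reverse := by
  intro m
  by_cases hm : m = 0
  · subst hm; decide
  · unfold Nat.toDigits
    rw [toDigitsCore_digits (m + 1) m [] (Nat.pos_of_ne_zero hm) (by omega)]
    simp [hm]

lemma toDigits_isDig {m : ℕ} {c : Char} (h : c ∈ Nat.toDigits 10 m) : pvIsDig c := by
  rw [toDigits_char] at h
  split at h
  · simp only [List.mem_singleton] at h; subst h; unfold pvIsDig; decide
  · rw [List.mem_reverse, List.mem_map] at h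
    rcases h with ⟨d, hd, rfl⟩
    exact digitChar_isDig (Nat.digits_lt_base (by norm_num) hd)

lemma toDigits_ne_nil (m : ℕ) : Nat.toDigits 10 m ≠ [] := by
  rw [toDigits_char]
  split
  · simp
  · simp only [ne_eq, List.reverse_eq_nil_iff, List.map_eq_nil_iff]
    rw [Nat.digits_eq_nil_iff_eq_zero]
    assumption

-- parser arithmetic
lemma parse_foldl (ds : List Char) : ∀ (a : Int),
    ds.foldl (fun a c => 10 * a + pvDigitVal c) a = a * 10 ^ ds.length + pvParseDigits ds := by
  induction ds with
  | nil => intro a; simp [pvParseDigits]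
  | cons c ds ih =>
    intro a
    simp only [List.foldl_cons, pvParseDigits, List.length_cons]
    rw [ih, ih (10 * 0 + pvDigitVal c)]
    ring

lemma parse_cons (c : Char) (ds : List Char) :
    pvParseDigits (c :: ds) = pvDigitVal c * 10 ^ ds.length + pvParseDigits ds := by
  have h : pvParseDigits (c :: ds) = ds.foldl (fun a c => 10 * a + pvDigitVal c) (10 * 0 + pvDigitVal c) := rfl
  rw [h, parse_foldl]
  ring

lemma parse_append (xs ys : List Char) :
    pvParseDigits (xs ++ ys) = pvParseDigits xs * 10 ^ ys.length + pvParseDigits ys := by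
  have h : pvParseDigits (xs ++ ys) = ys.foldl (fun a c => 10 * a + pvDigitVal c) (pvParseDigits xs) := by
    simp only [pvParseDigits, List.foldl_append]
  rw [h, parse_foldl]

lemma parse_bounds {ds : List Char} (h : ∀ c ∈ ds, pvIsDig c) :
    0 ≤ pvParseDigits ds ∧ pvParseDigits ds < 10 ^ ds.length := by
  induction ds with
  | nil => simp [pvParseDigits]
  | cons c ds ih =>
    have hc := pvIsDig_val (h c (by simp))
    have ih' := ih (fun x hx => h x (by simp [hx]))
    rw [parse_cons]
    have hp : (0:Int) < 10 ^ ds.length := by positivity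
    constructor
    · nlinarith [hc.1, ih'.1]
    · have : pvDigitVal c * 10 ^ ds.length ≤ 9 * 10 ^ ds.length := by nlinarith [hc.2]
      simp only [List.length_cons]
      have h10 : (10:Int) ^ (ds.length + 1) = 10 * 10 ^ ds.length := by ring
      nlinarith [ih'.2]

lemma parse_mono : ∀ {ds es : List Char}, List.Forall₂ (fun x y => pvDigitVal x ≤ pvDigitVal y) ds es →
    pvParseDigits ds ≤ pvParseDigits es := by
  intro ds es h
  induction h with
  | nil => exact le_refl _
  | @cons x y ds es hxy hrest ih =>
    rw [parse_cons, parse_cons, List.Forall₂.length_eq hrest]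
    have hp : (0:Int) ≤ 10 ^ es.length := by positivity
    nlinarith

lemma parse_strict {p t u : List Char} {x y : Char} (hlen : t.length = u.length)
    (hxy : pvDigitVal x < pvDigitVal y)
    (ht : ∀ c ∈ t, pvIsDig c) (hu : ∀ c ∈ u, pvIsDig c) :
    pvParseDigits (p ++ x :: t) < pvParseDigits (p ++ y :: u) := by
  rw [parse_append, parse_append, parse_cons, parse_cons, hlen]
  have hb1 := parse_bounds ht
  have hb2 := parse_bounds hu
  rw [hlen] at hb1
  have hp : (0:Int) < 10 ^ u.length := by positivity
  simp only [List.length_cons]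
  have hm : (pvDigitVal x + 1) * 10 ^ u.length ≤ pvDigitVal y * 10 ^ u.length :=
    mul_le_mul_of_nonneg_right (by omega) (le_of_lt hp)
  have hm2 : pvDigitVal x * 10 ^ u.length + 10 ^ u.length ≤ pvDigitVal y * 10 ^ u.length := by
    calc pvDigitVal x * 10 ^ u.length + 10 ^ u.length = (pvDigitVal x + 1) * 10 ^ u.length := by ring
    _ ≤ _ := hm
  simp only [hlen]
  linarith [hb1.2, hb2.1]

-- single-character replace is a map
lemma replace_single (a b : Char) (s : List Char) :
    PySem.Chars.replace s [a] [b] = pvSubst a b s := by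
  have go_single : ∀ (fuel : ℕ) (l acc : List Char), l.length ≤ fuel →
      PySem.Chars.replace.go [a] [b] fuel l acc = acc.reverse ++ pvSubst a b l := by
    intro fuel
    induction fuel with
    | zero =>
      intro l acc h
      rw [List.eq_nil_of_length_eq_zero (Nat.le_zero.mp h)]
      simp [PySem.Chars.replace.go, pvSubst]
    | succ f ih =>
      intro l acc h
      cases l with
      | nil => simp [PySem.Chars.replace.go, pvSubst]
      | cons c t =>
        by_cases hac : a = c
        · subst hac
          simp only [PySem.Chars.replace.go, List.isPrefixOf,
            Bool.and_true, beq_self_eq_true, if_true, List.length_singleton,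
            List.drop_succ_cons, List.drop_zero, List.reverse_singleton]
          rw [show [b] ++ acc = b :: acc from rfl, ih t (b :: acc) (by simpa using h)]
          simp [pvSubst]
        · have hbeq : (a == c) = false := beq_false_of_ne hac
          simp only [PySem.Chars.replace.go, List.isPrefixOf,
            Bool.and_true, hbeq, if_false]
          rw [ih t (c :: acc) (by simpa using h)]
          simp [pvSubst, Ne.symm hac]
  unfold PySem.Chars.replace
  simp only [List.isEmpty_cons, if_false]
  rw [go_single s.length s [] (le_refl _)]
  simp

lemma subst_id {a : Char} (b : Char) {s : List Char} (h : a ∉ s) : pvSubst a b s = s := by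
  unfold pvSubst
  induction s with
  | nil => rfl
  | cons x xs ih =>
    have hxa : x ≠ a := fun hxa => h (by simp [hxa])
    simp only [List.map_cons, if_neg hxa, List.cons.injEq, true_and]
    exact ih (fun hm => h (by simp [hm]))

lemma subst_self (a : Char) (s : List Char) : pvSubst a a s = s := by
  unfold pvSubst
  apply List.map_id''
  intro x
  split <;> simp_all

lemma subst_isDig {a b : Char} (hb : pvIsDig b) {s : List Char} (h : ∀ c ∈ s, pvIsDig c) :
    ∀ c ∈ pvSubst a b s, pvIsDig c := by
  intro c hc
  unfold pvSubst at hc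
  rcases List.mem_map.mp hc with ⟨x, hx, hfx⟩
  by_cases hxa : x = a
  · simp [hxa] at hfx; exact hfx ▸ hb
  · simp [hxa] at hfx; exact hfx ▸ h x hx

lemma isIn_singleton {c : Char} {s : List Char} : PySem.Chars.isIn [c] s = true ↔ c ∈ s := by
  rw [PySem.Chars.isIn_iff_infix]
  exact List.singleton_infix_iff c s

lemma toChars_small (i : Int) (h0 : 0 ≤ i) (h1 : i < 10) :
    PySem.Int.toChars i = [Nat.digitChar i.toNat] := by
  interval_cases i <;> decide

-- the fold('max' accumulation) shape of A's loop
lemma foldl_max_ge (cond : Int → Bool) (g : Int → Int) :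
    ∀ (l : List Int) (a : Int), a ≤ l.foldl (fun mx i => if cond i then max mx (g i) else mx) a := by
  intro l
  induction l with
  | nil => intro a; simp
  | cons x xs ih =>
    intro a
    simp only [List.foldl_cons]
    refine le_trans ?_ (ih _)
    split
    · exact le_max_left _ _
    · exact le_refl _

lemma foldl_max_mem (cond : Int → Bool) (g : Int → Int) :
    ∀ (l : List Int) (i₀ : Int), i₀ ∈ l → cond i₀ = true →
      ∀ (a : Int), g i₀ ≤ l.foldl (fun mx i => if cond i then max mx (g i) else mx) a := by
  intro l
  induction l with
  | nil => intro i₀ h; cases h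
  | cons x xs ih =>
    intro i₀ hmem hcond a
    rcases List.mem_cons.mp hmem with h | h
    · subst h
      simp only [List.foldl_cons, hcond, if_true]
      exact le_trans (le_max_right _ _) (foldl_max_ge cond g xs _)
    · exact ih i₀ h hcond _

lemma foldl_max_le (cond : Int → Bool) (g : Int → Int) {T : Int} :
    ∀ {l : List Int} {a : Int}, (∀ i ∈ l, cond i = true → g i ≤ T) → a ≤ T →
      l.foldl (fun mx i => if cond i then max mx (g i) else mx) a ≤ T := by
  intro l
  induction l with
  | nil => intro a _ ha; simpa using ha
  | cons x xs ih =>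
    intro a hub ha
    simp only [List.foldl_cons]
    refine ih (fun i hi hc => hub i (by simp [hi]) hc) ?_
    by_cases hc : cond x = true
    · simp [hc, max_le ha (hub x (by simp) hc)]
    · simpa [hc] using ha


lemma pvInt_digits {cs : List Char} (h : ∀ c ∈ cs, pvIsDig c) : pvInt cs = pvParseDigits cs := by
  cases cs with
  | nil => rfl
  | cons x xs =>
    unfold pvInt
    rw [if_neg]
    simp only [List.head?_cons, Option.some.injEq]
    exact pvIsDig_ne_dash (h x (by simp))

lemma pvInt_neg_head (xs : List Char) : pvInt ('-' :: xs) = -(pvParseDigits xs) := by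
  simp [pvInt]

lemma forall₂_dv_map {l : List Char} {f : Char → Char}
    (h : ∀ x ∈ l, pvDigitVal x ≤ pvDigitVal (f x)) :
    List.Forall₂ (fun x y => pvDigitVal x ≤ pvDigitVal y) l (l.map f) := by
  induction l with
  | nil => exact List.Forall₂.nil
  | cons x xs ih =>
    exact List.Forall₂.cons (h x (by simp)) (ih (fun y hy => h y (by simp [hy])))

lemma pvSubst_cons (a b x : Char) (s : List Char) :
    pvSubst a b (x :: s) = (if x = a then b else x) :: pvSubst a b s := rfl

lemma pvSubst_append (a b : Char) (xs ys : List Char) :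
    pvSubst a b (xs ++ ys) = pvSubst a b xs ++ pvSubst a b ys := by
  simp [pvSubst]

lemma pvSubst_length (a b : Char) (s : List Char) : (pvSubst a b s).length = s.length := by
  simp [pvSubst]

lemma main_neg (num : Int) (h : num < 0) : minMaxDifference num = minMaxDifference_alt num := by
  have hs : PySem.Int.toChars num = '-' :: Nat.toDigits 10 num.natAbs := by
    simp [PySem.Int.toChars, h]
  set D := Nat.toDigits 10 num.natAbs with hDdef
  have hdig : ∀ c ∈ D, pvIsDig c := fun c hc => toDigits_isDig hc
  have hdash : '-' ∉ D := fun hm => pvIsDig_ne_dash (hdig _ hm) rfl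
  have hsub : ∀ b, pvSubst '-' b ('-' :: D) = b :: D := by
    intro b
    rw [pvSubst_cons, if_pos rfl, subst_id b hdash]
  have hdig9 : ∀ c ∈ '9' :: D, pvIsDig c := by
    intro c hc
    rcases List.mem_cons.mp hc with rfl | hc
    · unfold pvIsDig; decide
    · exact hdig c hc
  unfold minMaxDifference minMaxDifference_alt
  simp only [hs, PySem.List.pyGet?_zero_cons, Option.getD_some]
  have hfold :
      (PySem.List.pyRange 0 10 1).foldl
        (fun mx i =>
          if PySem.Chars.isIn (PySem.Int.toChars i) ('-' :: D) then
            max mx (pvInt (PySem.Chars.replace ('-' :: D) (PySem.Int.toChars i) ['9']))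
          else mx)
        (pvInt (PySem.Chars.replace ('-' :: D) ['-'] ['9'])) =
      pvInt (PySem.Chars.replace ('-' :: D) ['-'] ['9']) := by
    apply le_antisymm
    · apply foldl_max_le
      · intro i hi _
        rw [PySem.List.mem_pyRange_one] at hi
        have hlt : i.toNat < 10 := by omega
        rw [toChars_small i hi.1 hi.2, replace_single, replace_single, hsub '9']
        have hd : pvIsDig (Nat.digitChar i.toNat) := digitChar_isDig hlt
        rw [pvSubst_cons, if_neg (fun he => pvIsDig_ne_dash hd he.symm), pvInt_neg_head,
          pvInt_digits hdig9]
        have h1 := parse_bounds (subst_isDig (by unfold pvIsDig; decide) hdig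
          (a := Nat.digitChar i.toNat) (b := '9'))
        have h2 := parse_bounds hdig9
        linarith [h1.1, h2.1]
      · exact le_refl _
    · exact foldl_max_ge _ _ _ _
  rw [hfold]
  have hfind : List.find? (fun c => c ≠ '9') ('-' :: D) = some '-' := rfl
  rw [replace_single, replace_single]
  simp only [hfind, hsub '9', hsub '0']

lemma main_nonneg (num : Int) (h : ¬ num < 0) : minMaxDifference num = minMaxDifference_alt num := by
  have hs : PySem.Int.toChars num = Nat.toDigits 10 num.toNat := by
    simp [PySem.Int.toChars, h]
  set D := Nat.toDigits 10 num.toNat with hDdef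
  have hdig : ∀ c ∈ D, pvIsDig c := fun c hc => toDigits_isDig hc
  have hdig9 : pvIsDig '9' := by unfold pvIsDig; decide
  obtain ⟨d₀, t₀, hD⟩ : ∃ d₀ t₀, D = d₀ :: t₀ := by
    cases hDl : D with
    | nil => exact absurd hDl (toDigits_ne_nil _)
    | cons a b => exact ⟨a, b, rfl⟩
  have hs0 : (PySem.List.pyGet? D 0).getD ' ' = d₀ := by
    rw [hD, PySem.List.pyGet?_zero_cons, Option.getD_some]
  have hd₀ : d₀ ∈ D := by rw [hD]; simp
  unfold minMaxDifference minMaxDifference_alt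
  simp only [hs, hs0]
  cases hf : List.find? (fun c => c ≠ '9') D with
  | none =>
    have hall : ∀ x ∈ D, x = '9' := by
      intro x hx
      have := List.find?_eq_none.mp hf x hx
      simpa using this
    have hsub9 : ∀ a, pvSubst a '9' D = D := by
      intro a
      by_cases ha : a = '9'
      · subst ha; exact subst_self _ _
      · exact subst_id _ (fun hm => ha (hall a hm))
    have hfold :
        (PySem.List.pyRange 0 10 1).foldl
          (fun mx i =>
            if PySem.Chars.isIn (PySem.Int.toChars i) D then
              max mx (pvInt (PySem.Chars.replace D (PySem.Int.toChars i) ['9']))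
            else mx)
          (pvInt (PySem.Chars.replace D [d₀] ['9'])) =
        pvInt (PySem.Chars.replace D [d₀] ['9']) := by
      apply le_antisymm
      · apply foldl_max_le
        · intro i hi _
          rw [PySem.List.mem_pyRange_one] at hi
          rw [toChars_small i hi.1 hi.2, replace_single, replace_single, hsub9, hsub9]
        · exact le_refl _
      · exact foldl_max_ge _ _ _ _
    rw [hfold]
    simp only [hf, replace_single, hsub9]
  | some c =>
    obtain ⟨hc9b, p, t, hsplit, hp⟩ := List.find?_eq_some_iff_append.mp hf
    have hc9 : c ≠ '9' := by simpa using hc9b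
    have hp9 : ∀ x ∈ p, x = '9' := by
      intro x hx
      have := hp x hx
      simpa using this
    have hcD : c ∈ D := by rw [hsplit]; simp
    have hcdig : pvIsDig c := hdig c hcD
    have htdig : ∀ x ∈ t, pvIsDig x := by
      intro x hx
      exact hdig x (by rw [hsplit]; simp [hx])
    have hv9 : pvDigitVal '9' = 9 := by decide
    have CB : ∀ d, pvIsDig d →
        pvParseDigits (pvSubst d '9' D) ≤ pvParseDigits (pvSubst c '9' D) := by
      intro d hd
      by_cases hdc : d = c
      · subst hdc; exact le_refl _
      by_cases hd9 : d = '9'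
      · subst hd9
        rw [subst_self]
        apply parse_mono
        apply forall₂_dv_map
        intro x hx
        dsimp only
        split
        · rw [hv9]; exact (pvIsDig_val (hdig x hx)).2
        · exact le_refl _
      · have hdp : d ∉ p := fun hm => hd9 (hp9 d hm)
        have hcp : c ∉ p := fun hm => hc9 (hp9 c hm)
        rw [hsplit, pvSubst_append, pvSubst_append, pvSubst_cons, pvSubst_cons,
          if_neg (fun he => hdc he.symm), if_pos rfl, subst_id '9' hdp, subst_id '9' hcp]
        apply le_of_lt
        apply parse_strict
        · rw [pvSubst_length, pvSubst_length]
        · rw [hv9]; exact pvIsDig_val_lt hcdig hc9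
        · exact subst_isDig hdig9 htdig
        · exact subst_isDig hdig9 htdig
    have hsubdig : ∀ a, ∀ x ∈ pvSubst a '9' D, pvIsDig x := fun a => subst_isDig hdig9 hdig
    have h48 := pvIsDig_toNat hcdig
    have hfold :
        (PySem.List.pyRange 0 10 1).foldl
          (fun mx i =>
            if PySem.Chars.isIn (PySem.Int.toChars i) D then
              max mx (pvInt (PySem.Chars.replace D (PySem.Int.toChars i) ['9']))
            else mx)
          (pvInt (PySem.Chars.replace D [d₀] ['9'])) =
        pvInt (pvSubst c '9' D) := by
      apply le_antisymm
      · apply foldl_max_le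
        · intro i hi _
          rw [PySem.List.mem_pyRange_one] at hi
          have hlt : i.toNat < 10 := by omega
          rw [toChars_small i hi.1 hi.2, replace_single,
            pvInt_digits (hsubdig _), pvInt_digits (hsubdig _)]
          exact CB _ (digitChar_isDig hlt)
        · rw [replace_single, pvInt_digits (hsubdig _), pvInt_digits (hsubdig _)]
          exact CB d₀ (hdig d₀ hd₀)
      · have hi₀mem : ((c.toNat : Int) - 48) ∈ PySem.List.pyRange 0 10 1 :=
          PySem.List.mem_pyRange_one.mpr (by omega)
        have htc : PySem.Int.toChars ((c.toNat : Int) - 48) = [c] := by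
          rw [toChars_small _ (by omega) (by omega)]
          congr 1
          have hn : ((c.toNat : Int) - 48).toNat = c.toNat - 48 := by omega
          rw [hn, digitChar_recover hcdig]
        have hcond : PySem.Chars.isIn (PySem.Int.toChars ((c.toNat : Int) - 48)) D = true := by
          rw [htc]
          exact isIn_singleton.mpr hcD
        have hmem := foldl_max_mem
          (fun i => PySem.Chars.isIn (PySem.Int.toChars i) D)
          (fun i => pvInt (PySem.Chars.replace D (PySem.Int.toChars i) ['9']))
          (PySem.List.pyRange 0 10 1) ((c.toNat : Int) - 48) hi₀mem hcond
          (pvInt (PySem.Chars.replace D [d₀] ['9']))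
        rw [htc, replace_single] at hmem
        exact hmem
    rw [hfold]
    simp only [replace_single]

-- ===== VERDICT (by name: the statement is the Claim_ definition above) =====
theorem minMaxDifference_spec : Claim_equal_minMaxDifference := by
  intro num _
  unfold Spec_minMaxDifference
  by_cases h : num < 0
  · exact main_neg num h
  · exact main_nonneg num h
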